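-- pv_equiv track=rewrite | github.com/samyak-n/MatrixMultiplicationApplication | matrix_operations.py | divide_matrix
-- ===== SOURCE A (Python) =====
-- def divide_matrix(matrix):
--     # Divide a matrix into four equal-sized submatrices
--     n = len(matrix)
--     half = n // 2
--     a11 = [matrix[i][:half] for i in range(half)]
--     a12 = [matrix[i][half:] for i in range(half)]
--     a21 = [matrix[i][:half] for i in range(half, n)]
--     a22 = [matrix[i][half:] for i in range(half, n)]
--     return a11, a12, a21, a22
-- ===== SOURCE B (Python) =====
-- def divide_matrix(matrix):
--     half = len(matrix) // 2
--
--     def split_row(row):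
--         # classify each element by its column index instead of slicing
--         left, right = [], []
--         for j, x in enumerate(row):
--             if j < half:
--                 left.append(x)
--             else:
--                 right.append(x)
--         return left, right
--
--     def go(i):
--         # recursion over the rows, building the quadrants back-to-front
--         if i == len(matrix):
--             return [], [], [], []
--         left, right = split_row(matrix[i])
--         a11, a12, a21, a22 = go(i + 1)
--         if i < half:
--             return [left] + a11, [right] + a12, a21, a22
--         else:
--             return a11, a12, [left] + a21, [right] + a22
--
--     return go(0)
-- ===== Notes on version B (the rewrite author's own statement) =====
-- stated objective: alternative
-- what changed: Replaces A's four index-range slicing comprehensions with a recursion over the rows that builds the quadrants back-to-front by prepending, and splits each row without slicing by classifying every element by its column index.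
import Mathlib
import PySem

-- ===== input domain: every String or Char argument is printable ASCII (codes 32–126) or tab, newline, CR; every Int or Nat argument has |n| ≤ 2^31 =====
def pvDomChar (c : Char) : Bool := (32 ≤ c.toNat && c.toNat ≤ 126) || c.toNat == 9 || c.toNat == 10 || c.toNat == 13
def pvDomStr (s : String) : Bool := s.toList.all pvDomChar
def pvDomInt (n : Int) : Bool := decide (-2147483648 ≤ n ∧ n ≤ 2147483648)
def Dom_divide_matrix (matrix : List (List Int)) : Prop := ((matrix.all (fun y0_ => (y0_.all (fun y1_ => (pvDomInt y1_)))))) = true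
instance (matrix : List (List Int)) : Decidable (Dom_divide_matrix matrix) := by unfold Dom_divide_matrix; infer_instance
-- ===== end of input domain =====

-- B replaces A's four index-range slicing comprehensions by a recursion over the rows
-- (building quadrants back-to-front) with an elementwise column-index split of each row
-- (objective: alternative).


-- ===== PORT A =====
-- literal transliteration of A: n = len(matrix); half = n // 2; four comprehensions over
-- index ranges; matrix[i] is ported with pyGetD (the index is always in range here).
def divide_matrix (matrix : List (List Int)) : List (List Int) × List (List Int) × List (List Int) × List (List Int) :=
  let n : Int := PySem.List.len matrix
  let half : Int := PySem.Int.floordiv n 2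
  let a11 := (PySem.List.pyRange 0 half).map (fun i => PySem.List.slice (PySem.List.pyGetD matrix i []) none (some half))
  let a12 := (PySem.List.pyRange 0 half).map (fun i => PySem.List.slice (PySem.List.pyGetD matrix i []) (some half) none)
  let a21 := (PySem.List.pyRange half n).map (fun i => PySem.List.slice (PySem.List.pyGetD matrix i []) none (some half))
  let a22 := (PySem.List.pyRange half n).map (fun i => PySem.List.slice (PySem.List.pyGetD matrix i []) (some half) none)
  (a11, a12, a21, a22)

-- ===== PORT B =====
-- Source B's split_row: a loop over enumerate(row) appending each element left or right
def dmSplitRow (half : Int) (row : List Int) : List Int × List Int :=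
  row.zipIdx.foldl
    (fun acc p => if (p.2 : Int) < half then (acc.1 ++ [p.1], acc.2) else (acc.1, acc.2 ++ [p.1]))
    ([], [])

-- Source B's go(i): recursion over the remaining rows (index i tracked alongside),
-- prepending to the quadrants returned by the recursive call
def dmGo (half : Int) (i : Nat) (rows : List (List Int)) :
    List (List Int) × List (List Int) × List (List Int) × List (List Int) :=
  match rows with
  | [] => ([], [], [], [])
  | r :: rest =>
    let lr := dmSplitRow half r
    let q := dmGo half (i + 1) rest
    if (i : Int) < half then
      (lr.1 :: q.1, lr.2 :: q.2.1, q.2.2.1, q.2.2.2)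
    else
      (q.1, q.2.1, lr.1 :: q.2.2.1, lr.2 :: q.2.2.2)

def divide_matrix_alt (matrix : List (List Int)) : List (List Int) × List (List Int) × List (List Int) × List (List Int) :=
  let half : Int := PySem.Int.floordiv (PySem.List.len matrix) 2
  dmGo half 0 matrix

-- ===== PRECONDITION & SPEC =====
def Spec_divide_matrix (matrix : List (List Int)) (out : List (List Int) × List (List Int) × List (List Int) × List (List Int)) : Prop := out = divide_matrix_alt matrix
instance (matrix : List (List Int)) (out : List (List Int) × List (List Int) × List (List Int) × List (List Int)) : Decidable (Spec_divide_matrix matrix out) := by unfold Spec_divide_matrix; infer_instance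

-- ===== CLAIM (what is proved, stated in full; the proofs are below) =====
def Claim_equal_divide_matrix : Prop := ∀ (matrix : List (List Int)), Dom_divide_matrix matrix → Spec_divide_matrix matrix (divide_matrix matrix)

-- ===== LEMMAS AND PROOFS =====

-- A's comprehension over range(a, a+m) equals a map over the corresponding m rows
lemma map_pyRange_pyGetD (f : List Int → List Int) (l : List (List Int)) :
    ∀ (m a : Nat), a + m ≤ l.length →
      (PySem.List.pyRange (a : Int) ((a + m : Nat) : Int)).map
          (fun i => f (PySem.List.pyGetD l i [])) =
        ((l.drop a).take m).map f := by
  intro m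
  induction m with
  | zero =>
    intro a _
    simp [PySem.List.pyRange]
  | succ m ih =>
    intro a hle
    have hab : (a : Int) < ((a + (m + 1) : Nat) : Int) := by push_cast; omega
    rw [PySem.List.pyRange_one_cons hab, List.map_cons]
    have hstep : ((a : Int) + 1) = ((a + 1 : Nat) : Int) := by push_cast; ring
    have hend : (a + (m + 1)) = ((a + 1) + m) := by omega
    rw [hstep, hend, ih (a + 1) (by omega)]
    have ha : a < l.length := by omega
    rw [show l.drop a = l[a] :: l.drop (a + 1) from (List.getElem_cons_drop ha).symm]
    rw [List.take_succ_cons, List.map_cons, PySem.List.pyGetD_natCast,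
      List.getD_eq_getElem l [] ha]

-- the elementwise split of a row at a nonnegative half is take/drop
lemma dmSplitRow_eq (h : Nat) :
    ∀ (row : List Int) (i0 : Nat) (a b : List Int),
      (row.zipIdx i0).foldl
          (fun acc p => if (p.2 : Int) < (h : Int) then (acc.1 ++ [p.1], acc.2) else (acc.1, acc.2 ++ [p.1]))
          (a, b) =
        (a ++ row.take (h - i0), b ++ row.drop (h - i0)) := by
  intro row
  induction row with
  | nil => intro i0 a b; simp
  | cons x row ih =>
    intro i0 a b
    rw [List.zipIdx_cons, List.foldl_cons]
    by_cases hlt : i0 < h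
    · rw [if_pos (by exact_mod_cast hlt), ih (i0 + 1)]
      have h1 : h - i0 = (h - (i0 + 1)) + 1 := by omega
      simp [h1, List.append_assoc]
    · rw [if_neg (by simpa using hlt), ih (i0 + 1)]
      have h1 : h - i0 = 0 := by omega
      have h2 : h - (i0 + 1) = 0 := by omega
      simp [h1, h2, List.append_assoc]

-- the recursion over the rows yields the four take/drop quadrants
lemma dmGo_eq (h : Nat) :
    ∀ (rows : List (List Int)) (i0 : Nat),
      dmGo (h : Int) i0 rows =
        ((rows.take (h - i0)).map (List.take h),
         (rows.take (h - i0)).map (List.drop h),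
         (rows.drop (h - i0)).map (List.take h),
         (rows.drop (h - i0)).map (List.drop h)) := by
  intro rows
  induction rows with
  | nil => intro i0; simp [dmGo]
  | cons r rest ih =>
    intro i0
    have hsplit : dmSplitRow (h : Int) r = (r.take h, r.drop h) := by
      have := dmSplitRow_eq h r 0 [] []
      simpa [dmSplitRow] using this
    rw [dmGo, ih (i0 + 1), hsplit]
    by_cases hlt : i0 < h
    · rw [if_pos (by exact_mod_cast hlt)]
      have h1 : h - i0 = (h - (i0 + 1)) + 1 := by omega
      simp [h1]
    · rw [if_neg (by simpa using hlt)]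
      have h1 : h - i0 = 0 := by omega
      have h2 : h - (i0 + 1) = 0 := by omega
      simp [h1, h2]

-- ===== VERDICT (by name: the statement is the Claim_ definition above) =====
theorem divide_matrix_spec : Claim_equal_divide_matrix := by
  intro matrix _
  unfold Spec_divide_matrix divide_matrix divide_matrix_alt
  have hlen : PySem.List.len matrix = (matrix.length : Int) := by
    simp [PySem.List.len]
  set h : Nat := matrix.length / 2 with hh
  have hhalf : PySem.Int.floordiv ((matrix.length : Int)) 2 = (h : Int) := by
    exact_mod_cast PySem.Int.floordiv_natCast matrix.length 2
  simp only [hlen, hhalf]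
  rw [dmGo_eq h matrix 0]
  have e1 := map_pyRange_pyGetD (fun r => PySem.List.slice r none (some (h : Int))) matrix h 0 (by omega)
  have e2 := map_pyRange_pyGetD (fun r => PySem.List.slice r (some (h : Int)) none) matrix h 0 (by omega)
  have e3 := map_pyRange_pyGetD (fun r => PySem.List.slice r none (some (h : Int))) matrix (matrix.length - h) h (by omega)
  have e4 := map_pyRange_pyGetD (fun r => PySem.List.slice r (some (h : Int)) none) matrix (matrix.length - h) h (by omega)
  simp only [Nat.cast_zero, Nat.zero_add, List.drop_zero] at e1 e2
  have hsum : h + (matrix.length - h) = matrix.length := by omega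
  rw [hsum] at e3 e4
  rw [e1, e2, e3, e4]
  have hdt : (matrix.drop h).take (matrix.length - h) = matrix.drop h :=
    List.take_of_length_le (by simp)
  simp [hdt, PySem.List.slice_to_natCast, PySem.List.slice_from_natCast]
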